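-- pv_equiv track=rewrite | github.com/mborgeson/dashboard_interface_project | backend/app/extraction/cell_mapping.py | _clean_field_name
-- ===== SOURCE A (Python) =====
-- def _clean_field_name(description: str) -> str:
--     """
--     Convert description to clean field name.
--
--     Transformations:
--     - Strip whitespace
--     - Replace spaces and special chars with underscores
--     - Convert to UPPERCASE
--     - Remove consecutive underscores
--     """
--     clean_name = description.strip()
--
--     # Replace special characters
--     replacements = {
--         " ": "_",
--         "-": "_",
--         "(": "",
--         ")": "",
--         "/": "_",
--         ".": "",
--         ",": "",
--         "'": "",
--         '"': "",
--         "#": "NUM",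
--         "%": "PCT",
--         "$": "",
--         "&": "AND",
--     }
--
--     for old, new in replacements.items():
--         clean_name = clean_name.replace(old, new)
--
--     clean_name = clean_name.upper()
--
--     # Remove consecutive underscores
--     while "__" in clean_name:
--         clean_name = clean_name.replace("__", "_")
--
--     # Remove leading/trailing underscores
--     clean_name = clean_name.strip("_")
--
--     return clean_name
-- ===== SOURCE B (Python) =====
-- def _clean_field_name(description: str) -> str:
--     # One pass: map each char through the table, collapsing underscore runs inline.
--     replacements = {
--         " ": "_", "-": "_", "(": "", ")": "", "/": "_", ".": "", ",": "",
--         "'": "", '"': "", "#": "NUM", "%": "PCT", "$": "", "&": "AND",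
--     }
--     out = []
--     for ch in description.strip():
--         piece = replacements.get(ch, ch)
--         if piece == "_" and out and out[-1] == "_":
--             continue
--         out += piece
--     return "".join(out).upper().strip("_")
-- ===== Notes on version B (the rewrite author's own statement) =====
-- stated objective: alternative
-- what changed: Replaces A's 13 sequential full-string replace passes plus a repeated whole-string double-underscore collapse loop with a single left-to-right character pass that maps each character through the table and collapses underscore runs inline.
import Mathlib
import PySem

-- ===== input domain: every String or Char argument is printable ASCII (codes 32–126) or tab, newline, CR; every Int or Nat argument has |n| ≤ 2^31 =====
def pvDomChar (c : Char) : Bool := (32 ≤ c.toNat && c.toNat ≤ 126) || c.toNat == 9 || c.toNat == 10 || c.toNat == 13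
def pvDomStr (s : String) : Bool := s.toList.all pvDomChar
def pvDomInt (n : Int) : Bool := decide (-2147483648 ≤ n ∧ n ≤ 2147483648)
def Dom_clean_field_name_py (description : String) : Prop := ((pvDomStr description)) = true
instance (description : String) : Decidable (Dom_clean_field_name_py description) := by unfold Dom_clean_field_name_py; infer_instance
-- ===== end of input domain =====

-- B replaces A's several full-string `.replace` passes and `while "__"` collapse loop by one
-- left-to-right character pass that collapses underscore runs inline (objective: alternative single-pass decomposition).

-- ===== PORT A =====
-- `pvRep2` is the effect of one Python pass `s.replace("__", "_")` (left-to-right,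
-- non-overlapping); the lemmas below it justify termination of A's `while "__" in s` loop.
def pvRep2 : List Char → List Char
  | [] => []
  | [x] => [x]
  | x :: y :: t => if x = '_' ∧ y = '_' then '_' :: pvRep2 t else x :: pvRep2 (y :: t)
termination_by l => l.length

lemma pvRep2_length_le (l : List Char) : (pvRep2 l).length ≤ l.length := by
  induction l using pvRep2.induct with
  | case1 => simp [pvRep2]
  | case2 x => simp [pvRep2]
  | case3 x y t h ih => simp [pvRep2, h]; omega
  | case4 x y t h ih => simp [pvRep2, h] at ih ⊢; omega

lemma pvRep2_length_lt (l : List Char) (h : ['_', '_'] <:+: l) :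
    (pvRep2 l).length < l.length := by
  induction l using pvRep2.induct with
  | case1 => simp at h
  | case2 x =>
    rcases h with ⟨a, b, hab⟩
    have := congrArg List.length hab; simp at this; omega
  | case3 x y t h2 ih =>
    have := pvRep2_length_le t
    simp [pvRep2, h2]; omega
  | case4 x y t h2 ih =>
    rw [List.infix_cons_iff] at h
    rcases h with h | h
    · exfalso
      rcases h with ⟨r, hr⟩
      cases hr
      exact h2 ⟨rfl, rfl⟩
    · have := ih h
      simp [pvRep2, h2] at this ⊢
      omega

lemma pvGo2_eq (fuel : Nat) : ∀ (l acc : List Char), l.length ≤ fuel →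
    PySem.Chars.replace.go ['_', '_'] ['_'] fuel l acc = acc.reverse ++ pvRep2 l := by
  induction fuel with
  | zero =>
    intro l acc hl
    have : l = [] := by cases l <;> simp at hl ⊢
    subst this
    simp [PySem.Chars.replace.go, pvRep2]
  | succ n ih =>
    intro l acc hl
    match l with
    | [] => simp [PySem.Chars.replace.go, pvRep2]
    | [c] =>
      have hpre : ['_', '_'].isPrefixOf [c] = false := by
        simp [List.isPrefixOf]
      simp only [PySem.Chars.replace.go, hpre]
      rw [ih [] (c :: acc) (by simp)]
      simp [pvRep2]
    | c :: d :: u =>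
      by_cases h : c = '_' ∧ d = '_'
      · obtain ⟨hc, hd⟩ := h
        subst hc; subst hd
        have hpre : ['_', '_'].isPrefixOf ('_' :: '_' :: u) = true := by
          simp [List.isPrefixOf]
        simp only [PySem.Chars.replace.go, hpre, if_pos]
        have hu : u.length ≤ n := by simp at hl; omega
        rw [show List.drop ['_','_'].length ('_' :: '_' :: u) = u from rfl]
        rw [ih u _ hu]
        simp [pvRep2]
      · have hpre : ['_', '_'].isPrefixOf (c :: d :: u) = false := by
          simp [List.isPrefixOf]
          intro hc hd; exact h ⟨hc.symm, hd.symm⟩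
        simp only [PySem.Chars.replace.go, hpre]
        rw [ih (d :: u) (c :: acc) (by simp at hl ⊢; omega)]
        simp [pvRep2, h]

lemma pvReplace_dd_eq (s : List Char) :
    PySem.Chars.replace s ['_', '_'] ['_'] = pvRep2 s := by
  rw [PySem.Chars.replace, if_neg (by decide)]
  exact (pvGo2_eq s.length s [] le_rfl).trans (by simp)

lemma pvReplace_dd_length_lt (s : List Char)
    (h : PySem.Chars.isIn ['_', '_'] s = true) :
    (PySem.Chars.replace s ['_', '_'] ['_']).length < s.length := by
  rw [pvReplace_dd_eq]
  exact pvRep2_length_lt s ((PySem.Chars.isIn_iff_infix _ _).mp h)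

-- A's `while "__" in clean_name: clean_name = clean_name.replace("__", "_")`
def pyCollapse (s : List Char) : List Char :=
  if h : PySem.Chars.isIn ['_', '_'] s = true then
    pyCollapse (PySem.Chars.replace s ['_', '_'] ['_'])
  else s
termination_by s.length
decreasing_by exact pvReplace_dd_length_lt s h

def pvDictA : PySem.Dict String String :=
  ((((((((((((PySem.Dict.empty.insert " " "_").insert "-" "_").insert "(" "").insert ")" "").insert
    "/" "_").insert "." "").insert "," "").insert "'" "").insert "\"" "").insert "#" "NUM").insert
    "%" "PCT").insert "$" "").insert "&" "AND"

def clean_field_name_py (description : String) : String :=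
  let cleanName := PySem.Chars.strip description.toList
  let cleanName := pvDictA.items.foldl
    (fun s (p : String × String) => PySem.Chars.replace s p.1.toList p.2.toList) cleanName
  let cleanName := PySem.Chars.upper cleanName
  let cleanName := pyCollapse cleanName
  String.ofList (PySem.Chars.stripChars cleanName ['_'])

-- ===== PORT B =====
def pvDictB : PySem.Dict Char String :=
  ((((((((((((PySem.Dict.empty.insert ' ' "_").insert '-' "_").insert '(' "").insert ')' "").insert
    '/' "_").insert '.' "").insert ',' "").insert '\'' "").insert '"' "").insert '#' "NUM").insert
    '%' "PCT").insert '$' "").insert '&' "AND"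

def clean_field_name_py_alt (description : String) : String :=
  let out := (PySem.Chars.strip description.toList).foldl
    (fun out ch =>
      let piece := (pvDictB.getD ch (String.ofList [ch])).toList
      if piece = ['_'] ∧ out.getLast? = some '_' then out else out ++ piece) []
  String.ofList (PySem.Chars.stripChars (PySem.Chars.upper out) ['_'])

-- ===== PRECONDITION & SPEC =====
def Spec_clean_field_name_py (description : String) (out : String) : Prop := out = clean_field_name_py_alt description
instance (description : String) (out : String) : Decidable (Spec_clean_field_name_py description out) := by unfold Spec_clean_field_name_py; infer_instance

-- ===== CLAIM (what is proved, stated in full; the proofs are below) =====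
def Claim_equal_clean_field_name_py : Prop := ∀ (description : String), Dom_clean_field_name_py description → Spec_clean_field_name_py description (clean_field_name_py description)

-- ===== LEMMAS AND PROOFS =====

-- the per-character replacement table, as a function
def pvRepl (c : Char) : List Char :=
  if c = ' ' then ['_'] else if c = '-' then ['_'] else if c = '(' then [] else if c = ')' then []
  else if c = '/' then ['_'] else if c = '.' then [] else if c = ',' then [] else if c = '\'' then []
  else if c = '"' then [] else if c = '#' then ['N', 'U', 'M'] else if c = '%' then ['P', 'C', 'T']
  else if c = '$' then [] else if c = '&' then ['A', 'N', 'D'] else [c]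

-- run-collapse of '_' with a "previous char was '_'" flag
def pvCol : Bool → List Char → List Char
  | _, [] => []
  | b, c :: m => if c = '_' ∧ b = true then pvCol b m else c :: pvCol (decide (c = '_')) m

-- B's loop body, abstracted over the already-emitted suffix's last char
def pvG : Option Char → List Char → List Char
  | _, [] => []
  | prev, c :: t =>
    let piece := pvRepl c
    if piece = ['_'] ∧ prev = some '_' then pvG prev t
    else piece ++ pvG (if piece = [] then prev else piece.getLast?) t

-- A's 13 chained replaces as nested flatMaps
def pvF (k : Char) (v : List Char) (s : List Char) : List Char :=
  s.flatMap (fun x => if x = k then v else [x])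

def pvChain (s : List Char) : List Char :=
  pvF '&' ['A','N','D'] (pvF '$' [] (pvF '%' ['P','C','T'] (pvF '#' ['N','U','M'] (pvF '"' []
    (pvF '\'' [] (pvF ',' [] (pvF '.' [] (pvF '/' ['_'] (pvF ')' [] (pvF '(' []
    (pvF '-' ['_'] (pvF ' ' ['_'] s))))))))))))

lemma pvGo1_eq (k : Char) (v : List Char) (fuel : Nat) : ∀ (l acc : List Char), l.length ≤ fuel →
    PySem.Chars.replace.go [k] v fuel l acc =
      acc.reverse ++ l.flatMap (fun x => if x = k then v else [x]) := by
  induction fuel with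
  | zero =>
    intro l acc hl
    have : l = [] := by cases l <;> simp at hl ⊢
    subst this
    simp [PySem.Chars.replace.go]
  | succ n ih =>
    intro l acc hl
    match l with
    | [] => simp [PySem.Chars.replace.go]
    | c :: t =>
      by_cases h : c = k
      · subst h
        have hpre : [c].isPrefixOf (c :: t) = true := by simp [List.isPrefixOf]
        simp only [PySem.Chars.replace.go, hpre, if_pos]
        rw [show List.drop [c].length (c :: t) = t from rfl]
        rw [ih t _ (by simp at hl; omega)]
        simp
      · have hpre : [k].isPrefixOf (c :: t) = false := by
          simp [List.isPrefixOf]; exact fun hc => absurd hc.symm h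
        simp only [PySem.Chars.replace.go, hpre]
        rw [ih t (c :: acc) (by simp at hl ⊢; omega)]
        simp [h]

lemma pvReplace_single (k : Char) (v s : List Char) :
    PySem.Chars.replace s [k] v = pvF k v s := by
  rw [PySem.Chars.replace, if_neg (by simp)]
  exact (pvGo1_eq k v s.length s [] le_rfl).trans (by simp [pvF])

lemma pvChain_append (a b : List Char) : pvChain (a ++ b) = pvChain a ++ pvChain b := by
  simp [pvChain, pvF, List.flatMap_append]

lemma pvChain_single (x : Char) : pvChain [x] = pvRepl x := by
  by_cases h1 : x = ' '; · subst h1; decide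
  by_cases h2 : x = '-'; · subst h2; decide
  by_cases h3 : x = '('; · subst h3; decide
  by_cases h4 : x = ')'; · subst h4; decide
  by_cases h5 : x = '/'; · subst h5; decide
  by_cases h6 : x = '.'; · subst h6; decide
  by_cases h7 : x = ','; · subst h7; decide
  by_cases h8 : x = '\''; · subst h8; decide
  by_cases h9 : x = '"'; · subst h9; decide
  by_cases h10 : x = '#'; · subst h10; decide
  by_cases h11 : x = '%'; · subst h11; decide
  by_cases h12 : x = '$'; · subst h12; decide
  by_cases h13 : x = '&'; · subst h13; decide
  simp [pvChain, pvF, pvRepl, h1, h2, h3, h4, h5, h6, h7, h8, h9, h10, h11, h12, h13]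

lemma pvChain_eq (s : List Char) : pvChain s = s.flatMap pvRepl := by
  induction s with
  | nil => rfl
  | cons x t ih =>
    rw [show x :: t = [x] ++ t from rfl, pvChain_append, pvChain_single, ih]
    simp

lemma pvFoldA_eq (t : List Char) :
    pvDictA.items.foldl
      (fun s (p : String × String) => PySem.Chars.replace s p.1.toList p.2.toList) t =
      t.flatMap pvRepl := by
  have hitems : pvDictA.items =
      [(" ", "_"), ("-", "_"), ("(", ""), (")", ""), ("/", "_"), (".", ""), (",", ""),
       ("'", ""), ("\"", ""), ("#", "NUM"), ("%", "PCT"), ("$", ""), ("&", "AND")] := by decide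
  rw [hitems]
  simp only [List.foldl]
  have t1 : (" " : String).toList = [' '] := by decide
  have t2 : ("-" : String).toList = ['-'] := by decide
  have t3 : ("(" : String).toList = ['('] := by decide
  have t4 : (")" : String).toList = [')'] := by decide
  have t5 : ("/" : String).toList = ['/'] := by decide
  have t6 : ("." : String).toList = ['.'] := by decide
  have t7 : ("," : String).toList = [','] := by decide
  have t8 : ("'" : String).toList = ['\''] := by decide
  have t9 : ("\"" : String).toList = ['"'] := by decide
  have t10 : ("#" : String).toList = ['#'] := by decide
  have t11 : ("%" : String).toList = ['%'] := by decide
  have t12 : ("$" : String).toList = ['$'] := by decide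
  have t13 : ("&" : String).toList = ['&'] := by decide
  have t14 : ("_" : String).toList = ['_'] := by decide
  have t15 : ("" : String).toList = [] := by decide
  have t16 : ("NUM" : String).toList = ['N','U','M'] := by decide
  have t17 : ("PCT" : String).toList = ['P','C','T'] := by decide
  have t18 : ("AND" : String).toList = ['A','N','D'] := by decide
  simp only [t1, t2, t3, t4, t5, t6, t7, t8, t9, t10, t11, t12, t13, t14, t15, t16, t17, t18]
  simp only [pvReplace_single]
  rw [← pvChain_eq]
  rfl

lemma pvUpperChar_eq_underscore_iff (c : Char) : (PySem.Chars.upperChar c = '_') ↔ c = '_' := by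
  constructor
  · intro h
    by_cases hl : PySem.Chars.islower c = true
    · exfalso
      simp [PySem.Chars.upperChar, hl] at h
      simp [PySem.Chars.islower, Char.le_def, UInt32.le_iff_toNat_le] at hl
      have hv : c.toNat = c.val.toNat := rfl
      have hval : Nat.isValidChar (c.toNat - 32) := Or.inl (by omega)
      have h2 := congrArg Char.toNat h
      rw [Char.toNat_ofNat, if_pos hval] at h2
      have : ('_').toNat = 95 := by decide
      omega
    · simpa [PySem.Chars.upperChar, hl] using h
  · intro h; subst h; decide

lemma pvCol_map_upper (m : List Char) : ∀ b,
    pvCol b (m.map PySem.Chars.upperChar) = (pvCol b m).map PySem.Chars.upperChar := by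
  induction m with
  | nil => intro b; rfl
  | cons c m ih =>
    intro b
    by_cases hcb : c = '_' ∧ b = true
    · obtain ⟨hc, hb⟩ := hcb; subst hc; subst hb
      have e1 : PySem.Chars.upperChar '_' = '_' := by decide
      simp [pvCol, e1, ih]
    · have h1 : ¬ (PySem.Chars.upperChar c = '_' ∧ b = true) :=
        fun h => hcb ⟨(pvUpperChar_eq_underscore_iff c).mp h.1, h.2⟩
      simp only [List.map_cons, pvCol]
      rw [if_neg h1, if_neg hcb, ih]
      have hd : (decide (PySem.Chars.upperChar c = '_')) = (decide (c = '_')) := by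
        simp [pvUpperChar_eq_underscore_iff]
      rw [hd]
      simp

lemma pvCol_upper (m : List Char) (b : Bool) :
    pvCol b (PySem.Chars.upper m) = PySem.Chars.upper (pvCol b m) := by
  simpa [PySem.Chars.upper] using pvCol_map_upper m b

lemma pvCol_cons (b : Bool) (c : Char) (m : List Char) :
    pvCol b (c :: m) = if c = '_' ∧ b = true then pvCol b m else c :: pvCol (decide (c = '_')) m :=
  rfl

lemma pvRep2_nil : pvRep2 [] = [] := by simp [pvRep2]

lemma pvRep2_one (x : Char) : pvRep2 [x] = [x] := by simp [pvRep2]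

lemma pvRep2_cons2 (x y : Char) (t : List Char) :
    pvRep2 (x :: y :: t) = if x = '_' ∧ y = '_' then '_' :: pvRep2 t else x :: pvRep2 (y :: t) := by
  simp only [pvRep2]

lemma pvCol_rep2 (l : List Char) : ∀ b, pvCol b (pvRep2 l) = pvCol b l := by
  induction l using pvRep2.induct with
  | case1 => intro b; rw [pvRep2_nil]
  | case2 x => intro b; rw [pvRep2_one]
  | case3 x y t h ih =>
    obtain ⟨hx, hy⟩ := h
    subst hx; subst hy
    intro b
    rw [pvRep2_cons2, if_pos ⟨rfl, rfl⟩]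
    cases b with
    | true =>
      rw [pvCol_cons, if_pos ⟨rfl, rfl⟩, ih]
      rw [pvCol_cons, if_pos ⟨rfl, rfl⟩, pvCol_cons, if_pos ⟨rfl, rfl⟩]
    | false =>
      rw [pvCol_cons, if_neg (by simp), pvCol_cons, if_neg (by simp)]
      have hdec : decide ('_' = '_') = true := by decide
      rw [hdec, ih]
      rw [pvCol_cons, if_pos ⟨rfl, rfl⟩]
  | case4 x y t h ih =>
    intro b
    rw [pvRep2_cons2, if_neg h]
    by_cases hx : x = '_' ∧ b = true
    · rw [pvCol_cons, if_pos hx, pvCol_cons b x (y :: t), if_pos hx]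
      exact ih b
    · rw [pvCol_cons, if_neg hx, pvCol_cons b x (y :: t), if_neg hx]
      rw [ih]

lemma pvCol_fixpoint (l : List Char) : ∀ b, ¬ (['_', '_'] <:+: l) →
    (b = true → l.head? ≠ some '_') → pvCol b l = l := by
  induction l with
  | nil => intro b _ _; rfl
  | cons c m ih =>
    intro b hinf hb
    rw [List.infix_cons_iff] at hinf
    push_neg at hinf
    obtain ⟨hpre, hm⟩ := hinf
    have hcb : ¬ (c = '_' ∧ b = true) := by
      rintro ⟨hc, hbt⟩
      exact (hb hbt) (by simp [hc])
    simp only [pvCol, if_neg hcb]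
    rw [ih (decide (c = '_')) hm]
    intro hd hh
    simp at hd
    cases m with
    | nil => simp at hh
    | cons d u =>
      simp at hh
      exact hpre (by simp [hd, hh])

lemma pvCollapse_eq_aux (n : Nat) : ∀ l : List Char, l.length ≤ n → pyCollapse l = pvCol false l := by
  induction n with
  | zero =>
    intro l hl
    have : l = [] := by cases l <;> simp at hl ⊢
    subst this
    have hf : PySem.Chars.isIn ['_', '_'] ([] : List Char) = false := by decide
    rw [pyCollapse]
    simp [hf]
    rfl
  | succ n ih =>
    intro l hl
    rw [pyCollapse]
    split_ifs with h
    · rw [pvReplace_dd_eq]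
      have hinf := (PySem.Chars.isIn_iff_infix _ _).mp h
      have hlt := pvRep2_length_lt l hinf
      rw [ih (pvRep2 l) (by omega)]
      exact pvCol_rep2 l false
    · exact (pvCol_fixpoint l false (fun hinf => h ((PySem.Chars.isIn_iff_infix _ _).mpr hinf))
        (by simp)).symm

lemma pvCollapse_eq (l : List Char) : pyCollapse l = pvCol false l :=
  pvCollapse_eq_aux l.length l le_rfl

lemma pvPieceB_eq (ch : Char) : (pvDictB.getD ch (String.ofList [ch])).toList = pvRepl ch := by
  by_cases h1 : ch = ' '; · subst h1; decide
  by_cases h2 : ch = '-'; · subst h2; decide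
  by_cases h3 : ch = '('; · subst h3; decide
  by_cases h4 : ch = ')'; · subst h4; decide
  by_cases h5 : ch = '/'; · subst h5; decide
  by_cases h6 : ch = '.'; · subst h6; decide
  by_cases h7 : ch = ','; · subst h7; decide
  by_cases h8 : ch = '\''; · subst h8; decide
  by_cases h9 : ch = '"'; · subst h9; decide
  by_cases h10 : ch = '#'; · subst h10; decide
  by_cases h11 : ch = '%'; · subst h11; decide
  by_cases h12 : ch = '$'; · subst h12; decide
  by_cases h13 : ch = '&'; · subst h13; decide
  simp [pvDictB, PySem.Dict.getD_insert, pvRepl, String.toList_ofList, h1, h2, h3, h4, h5, h6, h7, h8, h9, h10, h11, h12, h13]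

lemma pvG_cons (prev : Option Char) (c : Char) (t : List Char) :
    pvG prev (c :: t) =
      if pvRepl c = ['_'] ∧ prev = some '_' then pvG prev t
      else pvRepl c ++ pvG (if pvRepl c = [] then prev else (pvRepl c).getLast?) t := rfl

lemma pvFoldB_eq' (l : List Char) : ∀ out : List Char,
    l.foldl (fun out ch =>
      if pvRepl ch = ['_'] ∧ out.getLast? = some '_' then out else out ++ pvRepl ch) out =
    out ++ pvG out.getLast? l := by
  induction l with
  | nil => intro out; simp [pvG]
  | cons c t ih =>
    intro out
    simp only [List.foldl_cons]
    by_cases h : pvRepl c = ['_'] ∧ out.getLast? = some '_'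
    · rw [if_pos h, ih out, pvG_cons, if_pos h]
    · rw [if_neg h, ih (out ++ pvRepl c), pvG_cons, if_neg h]
      have hlast : (out ++ pvRepl c).getLast? =
          (if pvRepl c = [] then out.getLast? else (pvRepl c).getLast?) := by
        rw [List.getLast?_append]
        cases hp : pvRepl c with
        | nil => simp
        | cons a q =>
          rw [if_neg (by simp)]
          cases hq : (a :: q).getLast? with
          | none => simp [List.getLast?_eq_none_iff] at hq
          | some z => simp
      rw [hlast, List.append_assoc]

lemma pvFoldB_eq (l : List Char) : ∀ out : List Char,
    l.foldl (fun out ch =>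
      let piece := (pvDictB.getD ch (String.ofList [ch])).toList
      if piece = ['_'] ∧ out.getLast? = some '_' then out else out ++ piece) out =
    out ++ pvG out.getLast? l := by
  have hfun : (fun (out : List Char) ch =>
      let piece := (pvDictB.getD ch (String.ofList [ch])).toList
      if piece = ['_'] ∧ out.getLast? = some '_' then out else out ++ piece) =
      (fun out ch =>
        if pvRepl ch = ['_'] ∧ out.getLast? = some '_' then out else out ++ pvRepl ch) := by
    funext out ch
    simp only [pvPieceB_eq]
  rw [hfun]
  exact pvFoldB_eq' l

lemma pvCol_append_safe (piece : List Char) (hne : piece ≠ []) (hnu : '_' ∉ piece) :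
    ∀ (b : Bool) (m : List Char), pvCol b (piece ++ m) = piece ++ pvCol false m := by
  induction piece with
  | nil => exact absurd rfl hne
  | cons x p ih =>
    intro b m
    have hx : x ≠ '_' := by intro h; exact hnu (by simp [h])
    have hx' : ¬ (x = '_' ∧ b = true) := fun h => hx h.1
    have hdx : decide (x = '_') = false := by simp [hx]
    cases p with
    | nil =>
      rw [show (([x] : List Char) ++ m) = x :: m from rfl, pvCol_cons, if_neg hx', hdx]
      simp
    | cons y q =>
      have hp : '_' ∉ y :: q := fun h => hnu (by simp [h])
      rw [List.cons_append, pvCol_cons, if_neg hx', hdx]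
      rw [ih (by simp) hp]
      simp

lemma pvRepl_cases (c : Char) :
    pvRepl c = ['_'] ∨ pvRepl c = [] ∨ (pvRepl c ≠ [] ∧ '_' ∉ pvRepl c) := by
  by_cases h1 : c = ' '; · subst h1; left; decide
  by_cases h2 : c = '-'; · subst h2; left; decide
  by_cases h3 : c = '('; · subst h3; right; left; decide
  by_cases h4 : c = ')'; · subst h4; right; left; decide
  by_cases h5 : c = '/'; · subst h5; left; decide
  by_cases h6 : c = '.'; · subst h6; right; left; decide
  by_cases h7 : c = ','; · subst h7; right; left; decide
  by_cases h8 : c = '\''; · subst h8; right; left; decide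
  by_cases h9 : c = '"'; · subst h9; right; left; decide
  by_cases h10 : c = '#'; · subst h10; right; right; decide
  by_cases h11 : c = '%'; · subst h11; right; right; decide
  by_cases h12 : c = '$'; · subst h12; right; left; decide
  by_cases h13 : c = '&'; · subst h13; right; right; decide
  by_cases hu : c = '_'
  · subst hu; left; decide
  · right; right
    constructor
    · simp [pvRepl, h1, h2, h3, h4, h5, h6, h7, h8, h9, h10, h11, h12, h13]
    · simp [pvRepl, h1, h2, h3, h4, h5, h6, h7, h8, h9, h10, h11, h12, h13]
      exact fun h => hu h.symm

lemma pvG_eq_col (l : List Char) : ∀ prev : Option Char,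
    pvG prev l = pvCol (decide (prev = some '_')) (l.flatMap pvRepl) := by
  induction l with
  | nil => intro prev; simp [pvG, pvCol]
  | cons c t ih =>
    intro prev
    rw [pvG_cons, List.flatMap_cons]
    rcases pvRepl_cases c with hp | hp | ⟨hne, hnu⟩
    · rw [hp]
      by_cases hprev : prev = some '_'
      · rw [if_pos ⟨rfl, hprev⟩, ih prev, hprev]
        rw [show ((['_'] : List Char) ++ List.flatMap pvRepl t) = '_' :: List.flatMap pvRepl t
          from rfl]
        rw [pvCol_cons]
        rw [if_pos ⟨rfl, by simp⟩]
      · rw [if_neg (by rintro ⟨_, h⟩; exact hprev h)]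
        rw [show (if (['_'] : List Char) = [] then prev else (['_'] : List Char).getLast?) =
          some '_' from by simp]
        rw [ih (some '_')]
        rw [show ((['_'] : List Char) ++ List.flatMap pvRepl t) = '_' :: List.flatMap pvRepl t
          from rfl]
        rw [pvCol_cons, if_neg (by simp [hprev])]
        simp
    · rw [hp]
      rw [if_neg (by simp)]
      rw [show (if ([] : List Char) = [] then prev else ([] : List Char).getLast?) = prev
        from by simp]
      rw [ih prev]
      simp
    · have h1 : ¬ (pvRepl c = ['_'] ∧ prev = some '_') := by
        rintro ⟨h, _⟩; rw [h] at hnu; simp at hnu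
      rw [if_neg h1, if_neg hne, ih ((pvRepl c).getLast?)]
      rw [pvCol_append_safe (pvRepl c) hne hnu]
      congr 1
      have hl : (pvRepl c).getLast? ≠ some '_' := by
        intro h
        exact hnu (List.mem_of_getLast? h)
      simp [hl]

-- ===== VERDICT (by name: the statement is the Claim_ definition above) =====
theorem clean_field_name_py_spec : Claim_equal_clean_field_name_py := by
  intro description _
  unfold Spec_clean_field_name_py clean_field_name_py clean_field_name_py_alt
  simp only []
  congr 1
  rw [pvFoldA_eq, pvCollapse_eq, pvCol_upper, pvFoldB_eq]
  rw [show (([] : List Char)).getLast? = none from rfl, pvG_eq_col]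
  simp
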